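-- pv_equiv track=rewrite | github.com/elevate-foundry/salutations | examples/entangled_git_agent.py | _generate_semantic_summary
-- ===== SOURCE A (Python) =====
-- from typing import List, Dict, Any, Optional
--
-- def _generate_semantic_summary(analysis: Dict[str, Any]) -> str:
--     """
--     Generate semantic summary of changes using entangled model.
--
--     Args:
--         analysis: Change analysis
--
--     Returns:
--         Semantic summary
--     """
--     # In practice, would analyze actual code diffs
--     # For now, intelligent heuristics
--
--     files = analysis["files"]
--
--     # Detect patterns
--     if any("agent" in f.lower() for f in files):
--         return "Enhances autonomous agent capabilities"
--     elif any("test" in f.lower() for f in files):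
--         return "Improves test coverage and reliability"
--     elif any("doc" in f.lower() or f.endswith(".md") for f in files):
--         return "Updates documentation for clarity"
--     elif any("fix" in f.lower() for f in files):
--         return "Resolves identified issues"
--
--     return ""
-- ===== SOURCE B (Python) =====
-- def _generate_semantic_summary(analysis):
--     files = analysis["files"]
--     has_agent = has_test = has_doc = has_fix = False
--     for f in files:
--         lf = f.lower()
--         has_agent = has_agent or "agent" in lf
--         has_test = has_test or "test" in lf
--         has_doc = has_doc or "doc" in lf or f.endswith(".md")
--         has_fix = has_fix or "fix" in lf
--     if has_agent:
--         return "Enhances autonomous agent capabilities"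
--     if has_test:
--         return "Improves test coverage and reliability"
--     if has_doc:
--         return "Updates documentation for clarity"
--     if has_fix:
--         return "Resolves identified issues"
--     return ""
-- ===== Notes on version B (the rewrite author's own statement) =====
-- stated objective: alternative
-- what changed: Replaces A's four separate short-circuiting any() scans over the file list by a single pass that computes each f.lower() once and accumulates four boolean flags, followed by a flag-based priority cascade.
import Mathlib
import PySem

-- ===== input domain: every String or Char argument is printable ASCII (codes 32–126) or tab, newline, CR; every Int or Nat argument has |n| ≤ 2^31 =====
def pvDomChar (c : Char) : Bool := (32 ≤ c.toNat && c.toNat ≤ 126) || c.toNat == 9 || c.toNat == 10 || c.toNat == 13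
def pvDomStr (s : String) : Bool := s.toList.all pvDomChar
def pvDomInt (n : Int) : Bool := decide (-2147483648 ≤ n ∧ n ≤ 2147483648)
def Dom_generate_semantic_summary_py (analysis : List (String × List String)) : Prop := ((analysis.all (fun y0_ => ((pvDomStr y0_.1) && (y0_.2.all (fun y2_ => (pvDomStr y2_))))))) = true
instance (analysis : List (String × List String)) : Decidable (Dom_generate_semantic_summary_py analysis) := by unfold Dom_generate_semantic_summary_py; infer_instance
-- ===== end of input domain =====

-- ===== PORT A =====
-- B replaces A's four short-circuiting any() scans by one pass accumulating four flags; same results.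
def generate_semantic_summary_py (analysis : List (String × List String)) : String :=
  let files := ((PySem.Dict.mk analysis).get? "files").getD []
  if files.any (fun f => PySem.Str.isIn "agent" (PySem.Str.lower f)) then
    "Enhances autonomous agent capabilities"
  else if files.any (fun f => PySem.Str.isIn "test" (PySem.Str.lower f)) then
    "Improves test coverage and reliability"
  else if files.any (fun f => PySem.Str.isIn "doc" (PySem.Str.lower f) || PySem.Str.endswith f ".md") then
    "Updates documentation for clarity"
  else if files.any (fun f => PySem.Str.isIn "fix" (PySem.Str.lower f)) then
    "Resolves identified issues"
  else ""

-- ===== PORT B =====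
def generate_semantic_summary_py_alt (analysis : List (String × List String)) : String :=
  let files := ((PySem.Dict.mk analysis).get? "files").getD []
  let flags := files.foldl
    (fun (st : Bool × Bool × Bool × Bool) f =>
      let lf := PySem.Str.lower f
      (st.1 || PySem.Str.isIn "agent" lf,
       st.2.1 || PySem.Str.isIn "test" lf,
       st.2.2.1 || (PySem.Str.isIn "doc" lf || PySem.Str.endswith f ".md"),
       st.2.2.2 || PySem.Str.isIn "fix" lf))
    (false, false, false, false)
  if flags.1 then "Enhances autonomous agent capabilities"
  else if flags.2.1 then "Improves test coverage and reliability"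
  else if flags.2.2.1 then "Updates documentation for clarity"
  else if flags.2.2.2 then "Resolves identified issues"
  else ""

-- ===== PRECONDITION & SPEC =====
-- Pre_ excludes exactly the inputs on which A raises KeyError: dicts without a "files" key.
def Pre_generate_semantic_summary_py (analysis : List (String × List String)) : Prop :=
  "files" ∈ analysis.map Prod.fst
instance (analysis : List (String × List String)) : Decidable (Pre_generate_semantic_summary_py analysis) := by
  unfold Pre_generate_semantic_summary_py; infer_instance

def pvWitness_generate_semantic_summary_py : (List (String × List String)) := [("files", ["agent.py", "README.md"])]

def Spec_generate_semantic_summary_py (analysis : List (String × List String)) (out : String) : Prop := out = generate_semantic_summary_py_alt analysis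
instance (analysis : List (String × List String)) (out : String) : Decidable (Spec_generate_semantic_summary_py analysis out) := by unfold Spec_generate_semantic_summary_py; infer_instance

-- ===== CLAIM (what is proved, stated in full; the proofs are below) =====
def Claim_equal_generate_semantic_summary_py : Prop := ∀ (analysis : List (String × List String)), Dom_generate_semantic_summary_py analysis → Pre_generate_semantic_summary_py analysis → Spec_generate_semantic_summary_py analysis (generate_semantic_summary_py analysis)

-- ===== LEMMAS AND PROOFS =====

-- The flag fold of B computes exactly the four any-scans of A (or'ed onto the accumulator).
theorem flags_eq_any (l : List String) (a b c d : Bool) :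
    l.foldl
      (fun (st : Bool × Bool × Bool × Bool) f =>
        let lf := PySem.Str.lower f
        (st.1 || PySem.Str.isIn "agent" lf,
         st.2.1 || PySem.Str.isIn "test" lf,
         st.2.2.1 || (PySem.Str.isIn "doc" lf || PySem.Str.endswith f ".md"),
         st.2.2.2 || PySem.Str.isIn "fix" lf))
      (a, b, c, d)
    = (a || l.any (fun f => PySem.Str.isIn "agent" (PySem.Str.lower f)),
       b || l.any (fun f => PySem.Str.isIn "test" (PySem.Str.lower f)),
       c || l.any (fun f => PySem.Str.isIn "doc" (PySem.Str.lower f) || PySem.Str.endswith f ".md"),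
       d || l.any (fun f => PySem.Str.isIn "fix" (PySem.Str.lower f))) := by
  induction l generalizing a b c d with
  | nil => simp
  | cons x xs ih =>
    simp only [List.foldl_cons, List.any_cons, ih, Bool.or_assoc]

-- ===== VERDICT (by name: the statement is the Claim_ definition above) =====
theorem generate_semantic_summary_py_spec : Claim_equal_generate_semantic_summary_py := by
  intro analysis _ _
  unfold Spec_generate_semantic_summary_py generate_semantic_summary_py generate_semantic_summary_py_alt
  simp only [flags_eq_any]
  simp
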